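-- pv_equiv track=rewrite | github.com/marcel-krause/advent-of-code | 2024/Day20.py | compute_distances_to_target
-- ===== SOURCE A (Python) =====
-- def get_neighbors(node):
--     x, y = node
--     neighbors = set()
--
--     for dx in range(-1, 2):
--         for dy in range(-1, 2):
--             if abs(dx) == abs(dy):
--                 continue
--             neighbors.add((x+dx, y+dy))
--
--     return neighbors
--
-- def compute_distances_to_target(waypoints, START, TARGET):
--     unvisited_waypoints = waypoints.copy()
--     unvisited_waypoints.add(START)
--     node = TARGET
--     waypoint_distances = {}
--
--     distance = 1
--     while True:
--         neighbors = get_neighbors(node)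
--         next_node = neighbors.intersection(unvisited_waypoints).pop()
--         unvisited_waypoints.remove(next_node)
--         waypoint_distances[next_node] = distance
--
--         if next_node == START:
--             break
--
--         node = next_node
--         distance += 1
--
--     waypoint_distances[TARGET] = 0
--
--     return waypoint_distances
-- ===== SOURCE B (Python) =====
-- def compute_distances_to_target(waypoints, START, TARGET):
--     cells = set(waypoints)
--     cells.add(START)
--     distances = {}
--     frontier = [TARGET]
--     seen = {TARGET}
--     d = 1
--     while START not in seen:
--         nxt = []
--         for node in frontier:
--             x, y = node
--             for nb in ((x + 1, y), (x - 1, y), (x, y + 1), (x, y - 1)):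
--                 if nb in cells and nb not in seen:
--                     seen.add(nb)
--                     distances[nb] = d
--                     nxt.append(nb)
--         if not nxt:
--             raise KeyError("START is not reachable from TARGET")
--         frontier = nxt
--         d += 1
--     distances[TARGET] = 0
--     return distances
-- ===== Notes on version B (the rewrite author's own statement) =====
-- stated objective: alternative
-- what changed: A walks a single cursor from TARGET, popping the unique element of a 9-cell-neighbour-set/unvisited-set intersection and deleting it from the unvisited set at each step; B runs a breadth-first search: a frontier list expanded level by level over a fixed cell set with a separate seen set and a level counter, never mutating the cell set, and raising KeyError if the frontier dies out before START is seen.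
-- outside the precondition, e.g. on compute_distances_to_target({(0, 1)}, (0, 0), (0, 0)): A returns {(0, 1): 1, (0, 0): 0}, B returns {(0, 0): 0}
import Mathlib
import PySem

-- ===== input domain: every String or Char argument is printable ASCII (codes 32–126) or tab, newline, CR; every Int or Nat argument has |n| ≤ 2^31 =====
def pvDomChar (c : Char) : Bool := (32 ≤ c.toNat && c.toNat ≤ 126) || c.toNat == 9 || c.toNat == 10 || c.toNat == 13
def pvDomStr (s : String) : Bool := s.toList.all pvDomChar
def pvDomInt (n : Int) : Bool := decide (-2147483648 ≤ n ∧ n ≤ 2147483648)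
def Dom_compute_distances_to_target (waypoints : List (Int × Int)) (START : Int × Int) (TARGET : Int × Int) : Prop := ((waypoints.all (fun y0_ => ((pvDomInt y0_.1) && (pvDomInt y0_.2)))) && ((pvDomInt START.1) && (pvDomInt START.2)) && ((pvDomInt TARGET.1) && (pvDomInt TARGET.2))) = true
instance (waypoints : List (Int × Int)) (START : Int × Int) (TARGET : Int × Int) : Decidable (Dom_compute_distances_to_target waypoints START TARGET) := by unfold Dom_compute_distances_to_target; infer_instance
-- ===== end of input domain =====

-- B replaces A's single-cursor walk (9-cell neighbour set, set intersection, pop, removal from the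
-- unvisited set) by a breadth-first search: a frontier list expanded level by level over a fixed
-- cell set with a separate seen set and a level counter, raising KeyError if the frontier dies
-- before START is seen; objective: alternative.
-- A dict {(x,y): d} is rendered as the triple (x, y, d).

-- ===== PORT A =====
def get_neighbors (node : Int × Int) : PySem.Set (Int × Int) :=
  (PySem.List.pyRange (-1) 2 1).foldl (fun nb dx =>
    (PySem.List.pyRange (-1) 2 1).foldl (fun nb dy =>
      if dx.natAbs == dy.natAbs then nb
      else PySem.Set.add nb (node.1 + dx, node.2 + dy)) nb) PySem.Set.empty

-- the while-loop; fuel = |unvisited|+1 suffices, every iteration removes one element of unvisited.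
-- `.pop()` on the intersection is ported as its head: exact whenever the intersection is a
-- singleton (guaranteed by Pre_); empty intersection = KeyError (outside Pre_).
def loopA (START : Int × Int) : Nat → (Int × Int) → PySem.Set (Int × Int) → PySem.Dict (Int × Int) Int → Int → PySem.Dict (Int × Int) Int
  | 0, _, _, d, _ => d
  | f + 1, node, unvisited, d, dist =>
    match PySem.Set.inter (get_neighbors node) unvisited with
    | [] => d
    | next :: _ =>
      let unvisited' := (PySem.Set.remove? unvisited next).getD unvisited
      let d' := d.insert next dist
      if next == START then d' else loopA START f next unvisited' d' (dist + 1)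

def compute_distances_to_target (waypoints : List (Int × Int)) (START : Int × Int) (TARGET : Int × Int) : List (Int × Int × Int) :=
  (((loopA START ((PySem.Set.add (PySem.Set.ofList waypoints) START).length + 1) TARGET
      (PySem.Set.add (PySem.Set.ofList waypoints) START) PySem.Dict.empty 1).insert
    TARGET 0)).items.map (fun p => (p.1.1, p.1.2, p.2))

-- ===== PORT B =====
def neighbors4 (node : Int × Int) : List (Int × Int) :=
  [(node.1 + 1, node.2), (node.1 - 1, node.2), (node.1, node.2 + 1), (node.1, node.2 - 1)]

-- body of the inner `for nb in …: if nb in cells and nb not in seen: …`; state = (seen, distances, nxt)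
def bfsStep (cells : PySem.Set (Int × Int)) (d : Int)
    (st : PySem.Set (Int × Int) × PySem.Dict (Int × Int) Int × List (Int × Int)) (nb : Int × Int) :
    PySem.Set (Int × Int) × PySem.Dict (Int × Int) Int × List (Int × Int) :=
  if PySem.Set.contains cells nb && !PySem.Set.contains st.1 nb
  then (PySem.Set.add st.1 nb, st.2.1.insert nb d, st.2.2 ++ [nb])
  else st

-- one level: `for node in frontier: for nb in …`
def bfsLevel (cells : PySem.Set (Int × Int)) (d : Int) (frontier : List (Int × Int))
    (seen : PySem.Set (Int × Int)) (dist : PySem.Dict (Int × Int) Int) :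
    PySem.Set (Int × Int) × PySem.Dict (Int × Int) Int × List (Int × Int) :=
  frontier.foldl (fun st node => (neighbors4 node).foldl (bfsStep cells d) st) (seen, dist, [])

-- the `while START not in seen` loop; fuel = |cells|+2 suffices: every level that keeps the loop
-- going adds at least one new cell of `cells` to `seen`.  An empty next frontier is the explicit
-- `raise KeyError` (outside Pre_): the dict built so far is returned, never compared there.
def bfsLoop (START : Int × Int) : Nat → List (Int × Int) → PySem.Set (Int × Int) → PySem.Set (Int × Int) → PySem.Dict (Int × Int) Int → Int → PySem.Dict (Int × Int) Int
  | 0, _, _, _, dist, _ => dist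
  | f + 1, frontier, cells, seen, dist, d =>
    if PySem.Set.contains seen START then dist
    else
      let st := bfsLevel cells d frontier seen dist
      if st.2.2.isEmpty then dist
      else bfsLoop START f st.2.2 cells st.1 st.2.1 (d + 1)

def compute_distances_to_target_alt (waypoints : List (Int × Int)) (START : Int × Int) (TARGET : Int × Int) : List (Int × Int × Int) :=
  (((bfsLoop START ((PySem.Set.add (PySem.Set.ofList waypoints) START).length + 2) [TARGET]
      (PySem.Set.add (PySem.Set.ofList waypoints) START)
      (PySem.Set.add PySem.Set.empty TARGET) PySem.Dict.empty 1).insert TARGET 0)).items.map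
    (fun p => (p.1.1, p.1.2, p.2))

-- ===== PRECONDITION & SPEC =====
def adjacentPV (a b : Int × Int) : Bool := ((a.1 - b.1).natAbs + (a.2 - b.2).natAbs) == 1

-- Structural property of the INPUT set (not of either algorithm): waypoints ∪ {START} is a
-- unique-successor corridor seen from TARGET — walking from TARGET, each cell has exactly one
-- orthogonally adjacent cell among the not-yet-used ones, until START is hit.  Stated by primitive
-- recursion on the set because a corridor is inherently an inductive shape; it shares no code or
-- data representation with the ports (filter/adjacency/discard vs. intersection/pop vs. BFS levels).
def corridorOk (START : Int × Int) : Nat → (Int × Int) → List (Int × Int) → Bool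
  | 0, _, _ => false
  | f + 1, node, rem =>
    match rem.filter (fun q => adjacentPV node q) with
    | [next] => next == START || corridorOk START f next (PySem.Set.discard rem next)
    | _ => false

-- Pre_ excludes START = TARGET and TARGET among the waypoints (degenerate corners: A still walks
-- at least one step / re-enters TARGET into its unvisited set), and inputs whose waypoints∪{START}
-- is not a unique-successor corridor from TARGET to START: there A either raises KeyError (empty
-- intersection) or pops one of several candidates in hash order, so its returned dict is an
-- accident of CPython's set iteration order.
def Pre_compute_distances_to_target (waypoints : List (Int × Int)) (START : Int × Int) (TARGET : Int × Int) : Prop :=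
  TARGET ≠ START ∧ TARGET ∉ waypoints ∧
    corridorOk START ((PySem.Set.add (PySem.Set.ofList waypoints) START).length + 1) TARGET
      (PySem.Set.add (PySem.Set.ofList waypoints) START) = true
instance (waypoints : List (Int × Int)) (START : Int × Int) (TARGET : Int × Int) : Decidable (Pre_compute_distances_to_target waypoints START TARGET) := by unfold Pre_compute_distances_to_target; infer_instance

def pvWitness_compute_distances_to_target : (List (Int × Int)) × (Int × Int) × (Int × Int) :=
  ([(0, 1), (0, 2), (1, 2)], (2, 2), (0, 0))

def Spec_compute_distances_to_target (waypoints : List (Int × Int)) (START : Int × Int) (TARGET : Int × Int) (out : List (Int × Int × Int)) : Prop := out = compute_distances_to_target_alt waypoints START TARGET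
instance (waypoints : List (Int × Int)) (START : Int × Int) (TARGET : Int × Int) (out : List (Int × Int × Int)) : Decidable (Spec_compute_distances_to_target waypoints START TARGET out) := by unfold Spec_compute_distances_to_target; infer_instance

-- ===== CLAIM (what is proved, stated in full; the proofs are below) =====
def Claim_equal_compute_distances_to_target : Prop := ∀ (waypoints : List (Int × Int)) (START : Int × Int) (TARGET : Int × Int), Dom_compute_distances_to_target waypoints START TARGET → Pre_compute_distances_to_target waypoints START TARGET → Spec_compute_distances_to_target waypoints START TARGET (compute_distances_to_target waypoints START TARGET)

-- ===== LEMMAS AND PROOFS =====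

lemma get_neighbors_eq (node : Int × Int) :
    get_neighbors node =
      [(node.1 - 1, node.2), (node.1, node.2 - 1), (node.1, node.2 + 1), (node.1 + 1, node.2)] := by
  unfold get_neighbors
  rw [show PySem.List.pyRange (-1) 2 1 = [-1, 0, 1] by decide]
  norm_num [List.foldl]
  omega

lemma mem_get_neighbors (node p : Int × Int) :
    p ∈ get_neighbors node ↔ adjacentPV node p = true := by
  rw [get_neighbors_eq]
  simp only [List.mem_cons, List.not_mem_nil, or_false, adjacentPV, beq_iff_eq]
  obtain ⟨x, y⟩ := node; obtain ⟨a, b⟩ := p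
  simp only [Prod.mk.injEq]
  omega

lemma nodup_get_neighbors (node : Int × Int) : (get_neighbors node).Nodup := by
  rw [get_neighbors_eq]
  obtain ⟨x, y⟩ := node
  simp [Prod.ext_iff]
  omega

lemma mem_neighbors4 (node p : Int × Int) :
    p ∈ neighbors4 node ↔ adjacentPV node p = true := by
  simp only [neighbors4, adjacentPV, beq_iff_eq, List.mem_cons, List.not_mem_nil, or_false]
  obtain ⟨x, y⟩ := node; obtain ⟨a, b⟩ := p
  simp only [Prod.mk.injEq]
  omega

lemma nodup_neighbors4 (node : Int × Int) : (neighbors4 node).Nodup := by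
  obtain ⟨x, y⟩ := node
  simp [neighbors4, Prod.ext_iff]
  omega

lemma eq_singleton_of_nodup {α : Type} {l : List α} {v : α} (hn : l.Nodup) (hv : v ∈ l)
    (hall : ∀ q ∈ l, q = v) : l = [v] := by
  cases l with
  | nil => cases hv
  | cons a t =>
    have ha : a = v := hall a (by simp)
    subst ha
    cases t with
    | nil => rfl
    | cons b t' =>
      have hb : b = a := hall b (by simp)
      simp [hb] at hn

lemma pvContainsT {s : PySem.Set (Int × Int)} {x : Int × Int} (h : x ∈ s) :
    PySem.Set.contains s x = true := (PySem.Set.contains_iff s x).mpr h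

lemma pvContainsF {s : PySem.Set (Int × Int)} {x : Int × Int} (h : x ∉ s) :
    PySem.Set.contains s x = false := by
  cases hc : PySem.Set.contains s x
  · rfl
  · exact absurd ((PySem.Set.contains_iff s x).mp hc) h

lemma pvContains_add (s : PySem.Set (Int × Int)) (a q : Int × Int) :
    PySem.Set.contains (PySem.Set.add s a) q = (PySem.Set.contains s q || q == a) := by
  by_cases h1 : q ∈ PySem.Set.add s a
  · rw [pvContainsT h1]
    rcases (PySem.Set.mem_add s a q).mp h1 with h | h
    · rw [pvContainsT h]; rfl
    · subst h; simp
  · rw [pvContainsF h1]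
    have h2 : q ∉ s := fun h => h1 ((PySem.Set.mem_add s a q).mpr (Or.inl h))
    have h3 : q ≠ a := fun h => h1 ((PySem.Set.mem_add s a q).mpr (Or.inr h))
    rw [pvContainsF h2]
    simp [h3]

-- a fold of bfsStep over neighbours none of which qualifies leaves the state unchanged
lemma foldl_bfsStep_noop (cells : PySem.Set (Int × Int)) (d : Int) :
    ∀ (l : List (Int × Int)) (seen : PySem.Set (Int × Int)) (dist : PySem.Dict (Int × Int) Int)
      (acc : List (Int × Int)),
    (∀ q ∈ l, (PySem.Set.contains cells q && !PySem.Set.contains seen q) = false) →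
    l.foldl (bfsStep cells d) (seen, dist, acc) = (seen, dist, acc) := by
  intro l
  induction l with
  | nil => intro seen dist acc _; rfl
  | cons a t ih =>
    intro seen dist acc h
    simp only [List.foldl_cons, bfsStep, h a (by simp)]
    exact ih seen dist acc (fun q hq => h q (by simp [hq]))

-- a fold of bfsStep over a nodup list whose only qualifying element is `next`
lemma foldl_bfsStep_select (cells : PySem.Set (Int × Int)) (d : Int) :
    ∀ (l : List (Int × Int)) (seen : PySem.Set (Int × Int)) (dist : PySem.Dict (Int × Int) Int)
      (acc : List (Int × Int)) (next : Int × Int),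
    l.Nodup → next ∈ l →
    (PySem.Set.contains cells next && !PySem.Set.contains seen next) = true →
    (∀ q ∈ l, (PySem.Set.contains cells q && !PySem.Set.contains seen q) = true → q = next) →
    l.foldl (bfsStep cells d) (seen, dist, acc) =
      (PySem.Set.add seen next, dist.insert next d, acc ++ [next]) := by
  intro l
  induction l with
  | nil => intro _ _ _ _ _ h; cases h
  | cons a t ih =>
    intro seen dist acc next hnd hmem hcond huniq
    by_cases ha : a = next
    · subst ha
      simp only [List.foldl_cons, bfsStep, hcond, if_true]
      apply foldl_bfsStep_noop
      intro q hq
      have hqa : q ≠ a := by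
        intro h; subst h; exact (List.nodup_cons.mp hnd).1 hq
      have hca : PySem.Set.contains (PySem.Set.add seen a) q = (PySem.Set.contains seen q) := by
        rw [pvContains_add]
        have hb : (q == a) = false := beq_eq_false_iff_ne.mpr hqa
        simp [hb]
      rw [hca]
      by_cases hc : (PySem.Set.contains cells q && !PySem.Set.contains seen q) = true
      · exact absurd (huniq q (by simp [hq]) hc) hqa
      · simpa using hc
    · have hcafalse : (PySem.Set.contains cells a && !PySem.Set.contains seen a) = false := by
        by_cases hc : (PySem.Set.contains cells a && !PySem.Set.contains seen a) = true
        · exact absurd (huniq a (by simp) hc) ha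
        · simpa using hc
      simp only [List.foldl_cons, bfsStep, hcafalse]
      exact ih seen dist acc next (List.nodup_cons.mp hnd).2
        ((List.mem_cons.mp hmem).resolve_left (fun h => ha h.symm)) hcond
        (fun q hq => huniq q (by simp [hq]))

-- the core equivalence: the single-cursor walk equals the BFS whose seen-complement is the walk's
-- unvisited set; one extra unit of fuel covers the BFS's final START-detecting iteration.
lemma loopA_eq_bfsLoop (START : Int × Int) (cells : PySem.Set (Int × Int)) :
    ∀ (f : Nat) (node : Int × Int) (U seen : PySem.Set (Int × Int))
      (dist : PySem.Dict (Int × Int) Int) (d : Int),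
    node ≠ START → START ∈ U → U.Nodup →
    (∀ q, (PySem.Set.contains cells q && !PySem.Set.contains seen q) = true ↔ q ∈ U) →
    corridorOk START f node U = true →
    loopA START f node U dist d = bfsLoop START (f + 1) [node] cells seen dist d := by
  intro f
  induction f with
  | zero => intro node U seen dist d _ _ _ _ hc; simp [corridorOk] at hc
  | succ f ih =>
    intro node U seen dist d hns hSU hnd hinv hc
    simp only [corridorOk] at hc
    cases hfil : U.filter (fun q => adjacentPV node q) with
    | nil => rw [hfil] at hc; simp at hc
    | cons next rest =>
      cases rest with
      | cons b t => rw [hfil] at hc; simp at hc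
      | nil =>
        rw [hfil] at hc
        have hnextU : next ∈ U ∧ adjacentPV node next = true := by
          have : next ∈ U.filter (fun q => adjacentPV node q) := by rw [hfil]; simp
          simpa using List.mem_filter.mp this
        have huniq : ∀ q ∈ U, adjacentPV node q = true → q = next := by
          intro q hq hadj
          have : q ∈ U.filter (fun q => adjacentPV node q) := List.mem_filter.mpr ⟨hq, hadj⟩
          rw [hfil] at this; simpa using this
        -- A's selection: the intersection is exactly [next]
        have hinter : PySem.Set.inter (get_neighbors node) U = [next] := by
          apply eq_singleton_of_nodup (PySem.Set.nodup_inter _ _ (nodup_get_neighbors node))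
          · exact (PySem.Set.mem_inter _ _ _).mpr ⟨(mem_get_neighbors node next).mpr hnextU.2, hnextU.1⟩
          · intro q hq
            obtain ⟨hq1, hq2⟩ := (PySem.Set.mem_inter _ _ _).mp hq
            exact huniq q hq2 ((mem_get_neighbors node q).mp hq1)
        have hrem : (PySem.Set.remove? U next).getD U = PySem.Set.discard U next := by
          rw [PySem.Set.remove?_of_mem hnextU.1]; rfl
        -- B's loop guard: START is still unseen
        have hSseen : PySem.Set.contains seen START = false := by
          have := (hinv START).mpr hSU
          rcases Bool.and_eq_true_iff.mp this with ⟨_, h2⟩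
          simpa using h2
        -- B's level: the fold selects exactly next
        have hlevel : bfsLevel cells d [node] seen dist =
            (PySem.Set.add seen next, dist.insert next d, [next]) := by
          unfold bfsLevel
          simp only [List.foldl_cons, List.foldl_nil]
          have := foldl_bfsStep_select cells d (neighbors4 node) seen dist [] next
            (nodup_neighbors4 node) ((mem_neighbors4 node next).mpr hnextU.2)
            ((hinv next).mpr hnextU.1)
            (fun q hq hcq => huniq q ((hinv q).mp hcq) ((mem_neighbors4 node q).mp hq))
          simpa using this
        have hAstep : loopA START (f + 1) node U dist d =
            (if next == START then dist.insert next d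
             else loopA START f next (PySem.Set.discard U next) (dist.insert next d) (d + 1)) := by
          simp only [loopA, hinter, hrem]
        have hBstep : bfsLoop START (f + 1 + 1) [node] cells seen dist d =
            bfsLoop START (f + 1) [next] cells (PySem.Set.add seen next) (dist.insert next d) (d + 1) := by
          simp only [bfsLoop, hSseen, Bool.false_eq_true, if_false, hlevel, List.isEmpty_cons]
        rw [hAstep, hBstep]
        by_cases hstart : next = START
        · subst hstart
          rw [if_pos (by simp)]
          have hcn : PySem.Set.contains (PySem.Set.add seen next) next = true := by
            rw [pvContains_add]; simp
          simp only [bfsLoop, hcn, if_true]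
        · rw [if_neg (by simpa using hstart)]
          have hc' : corridorOk START f next (PySem.Set.discard U next) = true := by
            rcases Bool.or_eq_true_iff.mp hc with h | h
            · exact absurd (by simpa using h) hstart
            · exact h
          apply ih next (PySem.Set.discard U next) (PySem.Set.add seen next) _ _ hstart
            ((PySem.Set.mem_discard U next START).mpr ⟨hSU, fun h => hstart h.symm⟩)
            (PySem.Set.nodup_discard _ _ hnd) _ hc'
          intro q
          rw [pvContains_add]
          constructor
          · intro h
            rcases Bool.and_eq_true_iff.mp h with ⟨h1, h2⟩
            simp only [Bool.not_eq_true', Bool.or_eq_false_iff, beq_eq_false_iff_ne] at h2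
            exact (PySem.Set.mem_discard U next q).mpr ⟨(hinv q).mp (by rw [h1, h2.1]; rfl), h2.2⟩
          · intro h
            obtain ⟨h1, h2⟩ := (PySem.Set.mem_discard U next q).mp h
            have := (hinv q).mpr h1
            rcases Bool.and_eq_true_iff.mp this with ⟨g1, g2⟩
            simp only [Bool.not_eq_true'] at g2
            rw [g1, g2, beq_eq_false_iff_ne.mpr h2]; rfl

-- ===== VERDICT (by name: the statement is the Claim_ definition above) =====
theorem compute_distances_to_target_spec : Claim_equal_compute_distances_to_target := by
  intro waypoints START TARGET _ hpre
  obtain ⟨hts, htw, hcor⟩ := hpre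
  unfold Spec_compute_distances_to_target
  unfold compute_distances_to_target compute_distances_to_target_alt
  have hnd : (PySem.Set.add (PySem.Set.ofList waypoints) START).Nodup :=
    PySem.Set.nodup_add _ _ (PySem.Set.nodup_ofList waypoints)
  have hSU : START ∈ PySem.Set.add (PySem.Set.ofList waypoints) START :=
    (PySem.Set.mem_add _ _ _).mpr (Or.inr rfl)
  have hTnot : TARGET ∉ PySem.Set.add (PySem.Set.ofList waypoints) START := by
    intro h
    rcases (PySem.Set.mem_add _ _ _).mp h with h1 | h1
    · exact htw ((PySem.Set.mem_ofList _ _).mp h1)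
    · exact hts h1
  rw [loopA_eq_bfsLoop START _ _ TARGET _ (PySem.Set.add PySem.Set.empty TARGET)
      PySem.Dict.empty 1 hts hSU hnd ?_ hcor]
  intro q
  have hseen : PySem.Set.contains (PySem.Set.add PySem.Set.empty TARGET) q = (q == TARGET) := by
    rw [pvContains_add]
    rw [pvContainsF (by simp [PySem.Set.empty])]
    simp
  rw [hseen]
  constructor
  · intro h
    rcases Bool.and_eq_true_iff.mp h with ⟨h1, _⟩
    exact (PySem.Set.contains_iff _ _).mp h1
  · intro h
    have hq : q ≠ TARGET := fun he => hTnot (he ▸ h)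
    rw [pvContainsT h]
    simp [hq]
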